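-- pv_equiv track=rewrite | github.com/NiyaSinghShekhawat/IntelliCreditSystem-CodeKarigars | src/extractor.py | _detect_bank_header
-- ===== SOURCE A (Python) =====
-- def _detect_bank_header(header_row: list) -> dict:
--     """Map column indices to semantic names by fuzzy header matching."""
--     mapping = {}
--     for i, cell in enumerate(header_row):
--         cell_l = str(cell).lower().strip()
--         if any(kw in cell_l for kw in ['credit', 'deposit', 'receipts']) and 'credit' not in mapping:
--             mapping['credit'] = i
--         if any(kw in cell_l for kw in ['debit', 'withdrawal', 'payments']) and 'debit' not in mapping:
--             mapping['debit'] = i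
--         if any(kw in cell_l for kw in ['balance', 'bal']) and 'balance' not in mapping:
--             mapping['balance'] = i
--     return mapping
-- ===== SOURCE B (Python) =====
-- def _detect_bank_header(header_row: list) -> dict:
--     """Map column indices to semantic names via a keyword table, category by category."""
--     keyword_table = [
--         ('credit', ['credit', 'deposit', 'receipts']),
--         ('debit', ['debit', 'withdrawal', 'payments']),
--         ('balance', ['balance', 'bal']),
--     ]
--     found = []
--     for name, kws in keyword_table:
--         idx = next((i for i, cell in enumerate(header_row)
--                     if any(kw in str(cell).lower().strip() for kw in kws)), None)
--         if idx is not None: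
--             found.append((name, idx))
--     found.sort(key=lambda entry: entry[1])  # stable: category order kept on ties
--     return dict(found)
-- ===== Notes on version B (the rewrite author's own statement) =====
-- stated objective: alternative
-- what changed: A builds the mapping in one column-driven pass with three hard-coded membership-guarded inserts; B drives the loop by a keyword table instead, doing one first-match scan per category and then stably sorting the found entries by column index to restore A's insertion order.
import Mathlib
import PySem

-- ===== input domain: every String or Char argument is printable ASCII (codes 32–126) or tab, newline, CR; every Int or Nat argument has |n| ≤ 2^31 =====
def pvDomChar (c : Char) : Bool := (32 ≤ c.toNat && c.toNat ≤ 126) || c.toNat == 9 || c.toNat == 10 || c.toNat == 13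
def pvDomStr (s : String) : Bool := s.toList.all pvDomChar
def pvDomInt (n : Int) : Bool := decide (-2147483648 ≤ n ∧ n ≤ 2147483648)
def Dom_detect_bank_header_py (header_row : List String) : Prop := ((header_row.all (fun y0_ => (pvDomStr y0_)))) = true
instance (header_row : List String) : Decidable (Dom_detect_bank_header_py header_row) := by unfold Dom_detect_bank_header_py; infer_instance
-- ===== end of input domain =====

-- B re-implements A's column-driven single pass as category-driven first-match scans over a
-- keyword table, followed by a stable sort on the column index ('alternative', not faster).

-- ===== PORT A =====
-- shared matcher: any(kw in str(cell).lower().strip() for kw in kws)  (this test appears verbatim in both Pythons)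
def pvMatches (kws : List String) (cell : String) : Bool :=
  kws.any (fun kw => PySem.Str.isIn kw (PySem.Str.strip (PySem.Str.lower cell)))

-- one iteration of A's 'for i, cell in enumerate(header_row)' body (p = (i, cell))
def pvStepA (m : PySem.Dict String Int) (p : Int × String) : PySem.Dict String Int :=
  let m1 := if pvMatches ["credit", "deposit", "receipts"] p.2 && !(m.contains "credit") then m.insert "credit" p.1 else m
  let m2 := if pvMatches ["debit", "withdrawal", "payments"] p.2 && !(m1.contains "debit") then m1.insert "debit" p.1 else m1
  if pvMatches ["balance", "bal"] p.2 && !(m2.contains "balance") then m2.insert "balance" p.1 else m2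

def detect_bank_header_py (header_row : List String) : List (String × Int) :=
  ((PySem.List.enumerate header_row 0).foldl pvStepA PySem.Dict.empty).items

-- ===== PORT B =====
-- port of next((i for i, cell in enumerate(header_row) if any(kw in … for kw in kws)), None)
def pvFirstIdx (kws : List String) : List (Int × String) → Option Int
  | [] => none
  | p :: rest => if pvMatches kws p.2 then some p.1 else pvFirstIdx kws rest

def detect_bank_header_py_alt (header_row : List String) : List (String × Int) :=
  let keyword_table : List (String × List String) :=
    [("credit", ["credit", "deposit", "receipts"]),
     ("debit", ["debit", "withdrawal", "payments"]),
     ("balance", ["balance", "bal"])]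
  let found := keyword_table.foldl (fun acc nk =>
      match pvFirstIdx nk.2 (PySem.List.enumerate header_row 0) with
      | some i => acc ++ [(nk.1, i)]
      | none => acc) []
  (PySem.Dict.ofList (PySem.List.sorted found (fun e => e.2))).items

-- ===== PRECONDITION & SPEC =====
def Spec_detect_bank_header_py (header_row : List String) (out : List (String × Int)) : Prop := out = detect_bank_header_py_alt header_row
instance (header_row : List String) (out : List (String × Int)) : Decidable (Spec_detect_bank_header_py header_row out) := by unfold Spec_detect_bank_header_py; infer_instance

-- ===== CLAIM (what is proved, stated in full; the proofs are below) =====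
def Claim_equal_detect_bank_header_py : Prop := ∀ (header_row : List String), Dom_detect_bank_header_py header_row → Spec_detect_bank_header_py header_row (detect_bank_header_py header_row)

-- ===== LEMMAS AND PROOFS =====

-- sorted(found, key=index) as a function of the three optional first-match indices:
-- stable insertions (before the first strictly larger index), in category order
def pvOptIns (k : String) (o : Option Int) (l : List (String × Int)) : List (String × Int) :=
  match o with
  | none => l
  | some v => PySem.List.insertBy (fun a b => decide (a.2 < b.2)) (k, v) l

def pvS (a b c : Option Int) : List (String × Int) :=
  pvOptIns "balance" c (pvOptIns "debit" b (pvOptIns "credit" a []))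

-- the entry one column appends for one category (present already / matched or not)
def pvE (k : String) (o : Option Int) (m : Bool) (n : Int) : List (String × Int) :=
  if o = none ∧ m = true then [(k, n)] else []

-- B's 'found' list, as the fold over the keyword table literally reduces
def pvFound (a b c : Option Int) : List (String × Int) :=
  let t1 : List (String × Int) := match a with | some i => [] ++ [("credit", i)] | none => []
  let t2 : List (String × Int) := match b with | some j => t1 ++ [("debit", j)] | none => t1
  match c with | some k => t2 ++ [("balance", k)] | none => t2

-- one column updates a category's first-match index only if it is still missing
def pvUpd (o : Option Int) (m : Bool) (n : Int) : Option Int :=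
  match o with
  | some i => some i
  | none => if m then some n else none

-- 'a category's final index: the one found so far, else the first match in the rest'
def pvComb (o r : Option Int) : Option Int :=
  match o with
  | some i => some i
  | none => r

lemma pvAny_insertBy (f : (String × Int) → (String × Int) → Bool) (x : String × Int)
    (l : List (String × Int)) (q : (String × Int) → Bool) :
    (PySem.List.insertBy f x l).any q = (q x || l.any q) := by
  induction l with
  | nil => simp [PySem.List.insertBy]
  | cons y t ih =>
    simp only [PySem.List.insertBy]
    by_cases h : f x y = true
    · simp [h]
    · simp only [if_neg h, List.any_cons, ih]
      cases q y <;> cases q x <;> simp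

lemma pvMem_optIns {k : String} {o : Option Int} {l : List (String × Int)} {q : String × Int}
    (hq : q ∈ pvOptIns k o l) : q ∈ l ∨ ∃ i, o = some i ∧ q = (k, i) := by
  rcases o with _ | v
  · exact Or.inl hq
  · rcases (PySem.List.mem_insertBy _ _ _ _).1 hq with h | h
    · exact Or.inr ⟨v, rfl, h⟩
    · exact Or.inl h

lemma pvContains_S (a b c : Option Int) (key : String)
    (hk : key = "credit" ∨ key = "debit" ∨ key = "balance") :
    (PySem.Dict.mk (pvS a b c)).contains key =
      (if key = "credit" then a.isSome else if key = "debit" then b.isSome else c.isSome) := by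
  rcases a with _ | i <;> rcases b with _ | j <;> rcases c with _ | k' <;>
    rcases hk with rfl | rfl | rfl <;>
    simp [PySem.Dict.contains, pvS, pvOptIns, pvAny_insertBy]

lemma pvContains_mk_append (L E : List (String × Int)) (key : String) :
    (PySem.Dict.mk (L ++ E)).contains key =
      ((PySem.Dict.mk L).contains key || E.any (fun p => p.1 == key)) := by
  simp [PySem.Dict.contains, List.any_append]

lemma pvAny_pvE {k key : String} (h : (k == key) = false) (o : Option Int) (m : Bool) (n : Int) :
    (pvE k o m n).any (fun p => p.1 == key) = false := by
  unfold pvE; split <;> simp [h]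

lemma pvInsertBy_append {l : List (String × Int)} {n : Int} (k : String)
    (h : ∀ q ∈ l, q.2 ≤ n) :
    PySem.List.insertBy (fun a b => decide (a.2 < b.2)) (k, n) l = l ++ [(k, n)] := by
  apply PySem.List.insertBy_of_forall_not_before
  intro y hy
  simp only [decide_eq_false_iff_not, not_lt]
  exact h y hy

lemma pvInsertBy_append_right (x : String × Int) (u w : List (String × Int))
    (h : ∀ q ∈ w, x.2 < q.2) :
    PySem.List.insertBy (fun a b => decide (a.2 < b.2)) x (u ++ w) =
      (PySem.List.insertBy (fun a b => decide (a.2 < b.2)) x u) ++ w := by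
  induction u with
  | nil =>
    cases w with
    | nil => rfl
    | cons q t =>
      simp only [List.nil_append, PySem.List.insertBy]
      rw [if_pos (by simpa using h q (by simp))]
      rfl
  | cons y u' ih =>
    simp only [List.cons_append, PySem.List.insertBy]
    by_cases hb : (decide (x.2 < y.2)) = true
    · rw [if_pos hb, if_pos hb]; simp
    · rw [if_neg hb, if_neg hb]; simp [ih]

lemma pvOptIns_append_right (k : String) (o : Option Int) (u w : List (String × Int))
    (h : ∀ q ∈ w, ∀ i, o = some i → i < q.2) :
    pvOptIns k o (u ++ w) = pvOptIns k o u ++ w := by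
  rcases o with _ | v
  · rfl
  · exact pvInsertBy_append_right (k, v) u w (fun q hq => h q hq v rfl)

-- RHS single-category update lemmas
lemma pvS_updA (a b c : Option Int) (m : Bool) (n : Int)
    (hb : ∀ i, b = some i → i < n) (hc : ∀ i, c = some i → i < n) :
    pvS (pvUpd a m n) b c = pvS a b c ++ pvE "credit" a m n := by
  rcases a with _ | i
  · cases hm : m
    · simp [pvUpd, pvE]
    · have h0 : pvOptIns "credit" (some n) [] = [] ++ [("credit", n)] := rfl
      have h1 : pvOptIns "debit" b ([] ++ [("credit", n)]) =
          pvOptIns "debit" b [] ++ [("credit", n)] := by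
        apply pvOptIns_append_right
        intro q hq i hi; simp at hq; subst hq; exact hb i hi
      have h2 : pvOptIns "balance" c (pvOptIns "debit" b [] ++ [("credit", n)]) =
          pvOptIns "balance" c (pvOptIns "debit" b []) ++ [("credit", n)] := by
        apply pvOptIns_append_right
        intro q hq i hi; simp at hq; subst hq; exact hc i hi
      have he : pvE "credit" (none : Option Int) true n = [("credit", n)] := by simp [pvE]
      rw [he]
      show pvS (some n) b c = pvS none b c ++ [("credit", n)]
      calc pvS (some n) b c
          = pvOptIns "balance" c (pvOptIns "debit" b (pvOptIns "credit" (some n) [])) := rfl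
        _ = pvOptIns "balance" c (pvOptIns "debit" b ([] ++ [("credit", n)])) := by rw [h0]
        _ = pvOptIns "balance" c (pvOptIns "debit" b [] ++ [("credit", n)]) := by rw [h1]
        _ = pvOptIns "balance" c (pvOptIns "debit" b []) ++ [("credit", n)] := h2
        _ = pvS none b c ++ [("credit", n)] := rfl
  · simp [pvUpd, pvE]

lemma pvS_updB (a b c : Option Int) (m : Bool) (n : Int)
    (ha : ∀ i, a = some i → i ≤ n) (hc : ∀ i, c = some i → i < n) :
    pvS a (pvUpd b m n) c = pvS a b c ++ pvE "debit" b m n := by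
  rcases b with _ | j
  · cases hm : m
    · simp [pvUpd, pvE]
    · have h1 : pvOptIns "debit" (some n) (pvOptIns "credit" a []) =
          pvOptIns "credit" a [] ++ [("debit", n)] := by
        apply pvInsertBy_append
        intro q hq
        rcases pvMem_optIns hq with h | ⟨i, hi, hq'⟩
        · cases h
        · subst hq'; exact ha i hi
      have h2 : pvOptIns "balance" c (pvOptIns "credit" a [] ++ [("debit", n)]) =
          pvOptIns "balance" c (pvOptIns "credit" a []) ++ [("debit", n)] := by
        apply pvOptIns_append_right
        intro q hq i hi; simp at hq; subst hq; exact hc i hi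
      have he : pvE "debit" (none : Option Int) true n = [("debit", n)] := by simp [pvE]
      rw [he]
      show pvS a (some n) c = pvS a none c ++ [("debit", n)]
      calc pvS a (some n) c
          = pvOptIns "balance" c (pvOptIns "debit" (some n) (pvOptIns "credit" a [])) := rfl
        _ = pvOptIns "balance" c (pvOptIns "credit" a [] ++ [("debit", n)]) := by rw [h1]
        _ = pvOptIns "balance" c (pvOptIns "credit" a []) ++ [("debit", n)] := h2
        _ = pvS a none c ++ [("debit", n)] := rfl
  · simp [pvUpd, pvE]

lemma pvS_updC (a b c : Option Int) (m : Bool) (n : Int)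
    (ha : ∀ i, a = some i → i ≤ n) (hb : ∀ i, b = some i → i ≤ n) :
    pvS a b (pvUpd c m n) = pvS a b c ++ pvE "balance" c m n := by
  rcases c with _ | k'
  · cases hm : m
    · simp [pvUpd, pvE]
    · have he : pvE "balance" (none : Option Int) true n = [("balance", n)] := by simp [pvE]
      rw [he]
      show pvOptIns "balance" (some n) (pvOptIns "debit" b (pvOptIns "credit" a [])) =
        pvOptIns "debit" b (pvOptIns "credit" a []) ++ [("balance", n)]
      apply pvInsertBy_append
      intro q hq
      rcases pvMem_optIns hq with h | ⟨i, hi, hq'⟩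
      · rcases pvMem_optIns h with h' | ⟨i, hi, hq'⟩
        · cases h'
        · subst hq'; exact ha i hi
      · subst hq'; exact hb i hi
  · simp [pvUpd, pvE]

lemma pvUpd_le {o : Option Int} {m : Bool} {n : Int}
    (h : ∀ i, o = some i → i < n) : ∀ i, pvUpd o m n = some i → i ≤ n := by
  intro i hi
  rcases o with _ | j
  · cases m
    · simp [pvUpd] at hi
    · simp [pvUpd] at hi; omega
  · have := h j rfl; simp [pvUpd] at hi; omega

lemma pvUpd_lt {o : Option Int} {m : Bool} {n : Int}
    (h : ∀ i, o = some i → i < n) : ∀ i, pvUpd o m n = some i → i < n + 1 := by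
  intro i hi
  rcases o with _ | j
  · cases m
    · simp [pvUpd] at hi
    · simp [pvUpd] at hi; omega
  · have := h j rfl; simp [pvUpd] at hi; omega

-- A's step, at the list level: each matched-and-missing category appends its entry at the end
lemma pvDictInsert_of_not_contains (L : List (String × Int)) (key : String) (v : Int)
    (h : (PySem.Dict.mk L).contains key = false) :
    (PySem.Dict.mk L).insert key v = PySem.Dict.mk (L ++ [(key, v)]) := by
  simp [PySem.Dict.insert, h]

lemma pvStepA_eq_append (a b c : Option Int) (n : Int) (x : String) :
    pvStepA (PySem.Dict.mk (pvS a b c)) (n, x) =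
      PySem.Dict.mk (pvS a b c ++ pvE "credit" a (pvMatches ["credit", "deposit", "receipts"] x) n
        ++ pvE "debit" b (pvMatches ["debit", "withdrawal", "payments"] x) n
        ++ pvE "balance" c (pvMatches ["balance", "bal"] x) n) := by
  have h1 : (if pvMatches ["credit", "deposit", "receipts"] x && !((PySem.Dict.mk (pvS a b c)).contains "credit")
        then (PySem.Dict.mk (pvS a b c)).insert "credit" n else PySem.Dict.mk (pvS a b c)) =
      PySem.Dict.mk (pvS a b c ++ pvE "credit" a (pvMatches ["credit", "deposit", "receipts"] x) n) := by
    have hcc : (PySem.Dict.mk (pvS a b c)).contains "credit" = a.isSome := by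
      simpa using pvContains_S a b c "credit" (Or.inl rfl)
    rcases a with _ | i <;> cases hm : pvMatches ["credit", "deposit", "receipts"] x
    · simp [pvE]
    · simp only [Option.isSome_none] at hcc
      simp [hcc, pvDictInsert_of_not_contains _ _ _ hcc, pvE]
    · simp [pvE]
    · simp only [Option.isSome_some] at hcc
      simp [hcc, pvE]
  rw [show pvStepA (PySem.Dict.mk (pvS a b c)) (n, x) =
      (let m1 := if pvMatches ["credit", "deposit", "receipts"] x && !((PySem.Dict.mk (pvS a b c)).contains "credit")
          then (PySem.Dict.mk (pvS a b c)).insert "credit" n else PySem.Dict.mk (pvS a b c);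
       let m2 := if pvMatches ["debit", "withdrawal", "payments"] x && !(m1.contains "debit")
          then m1.insert "debit" n else m1;
       if pvMatches ["balance", "bal"] x && !(m2.contains "balance")
          then m2.insert "balance" n else m2) from rfl]
  simp only []
  rw [h1]
  have hcd : (PySem.Dict.mk (pvS a b c ++ pvE "credit" a (pvMatches ["credit", "deposit", "receipts"] x) n)).contains "debit" = b.isSome := by
    rw [pvContains_mk_append,
        pvAny_pvE (by decide) a (pvMatches ["credit", "deposit", "receipts"] x) n]
    simpa using pvContains_S a b c "debit" (Or.inr (Or.inl rfl))
  have h2 : (if pvMatches ["debit", "withdrawal", "payments"] x && !((PySem.Dict.mk (pvS a b c ++ pvE "credit" a (pvMatches ["credit", "deposit", "receipts"] x) n)).contains "debit")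
        then (PySem.Dict.mk (pvS a b c ++ pvE "credit" a (pvMatches ["credit", "deposit", "receipts"] x) n)).insert "debit" n
        else PySem.Dict.mk (pvS a b c ++ pvE "credit" a (pvMatches ["credit", "deposit", "receipts"] x) n)) =
      PySem.Dict.mk (pvS a b c ++ pvE "credit" a (pvMatches ["credit", "deposit", "receipts"] x) n
        ++ pvE "debit" b (pvMatches ["debit", "withdrawal", "payments"] x) n) := by
    rcases b with _ | j <;> cases hm : pvMatches ["debit", "withdrawal", "payments"] x
    · have he : pvE "debit" (none : Option Int) false n = [] := by simp [pvE]
      rw [he]; simp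
    · simp only [Option.isSome_none] at hcd
      have he : pvE "debit" (none : Option Int) true n = [("debit", n)] := by simp [pvE]
      rw [he, hcd, pvDictInsert_of_not_contains _ _ _ hcd]; simp
    · have he : pvE "debit" (some j) false n = [] := by simp [pvE]
      rw [he]; simp
    · simp only [Option.isSome_some] at hcd
      have he : pvE "debit" (some j) true n = [] := by simp [pvE]
      rw [he, hcd]; simp
  rw [h2]
  have hcb : (PySem.Dict.mk (pvS a b c ++ pvE "credit" a (pvMatches ["credit", "deposit", "receipts"] x) n
        ++ pvE "debit" b (pvMatches ["debit", "withdrawal", "payments"] x) n)).contains "balance" = c.isSome := by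
    rw [pvContains_mk_append, pvContains_mk_append,
        pvAny_pvE (by decide) a (pvMatches ["credit", "deposit", "receipts"] x) n,
        pvAny_pvE (by decide) b (pvMatches ["debit", "withdrawal", "payments"] x) n]
    simpa using pvContains_S a b c "balance" (Or.inr (Or.inr rfl))
  rcases c with _ | k' <;> cases hm : pvMatches ["balance", "bal"] x
  · have he : pvE "balance" (none : Option Int) false n = [] := by simp [pvE]
    rw [he]; simp
  · simp only [Option.isSome_none] at hcb
    have he : pvE "balance" (none : Option Int) true n = [("balance", n)] := by simp [pvE]
    rw [he, hcb, pvDictInsert_of_not_contains _ _ _ hcb]; simp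
  · have he : pvE "balance" (some k') false n = [] := by simp [pvE]
    rw [he]; simp
  · simp only [Option.isSome_some] at hcb
    have he : pvE "balance" (some k') true n = [] := by simp [pvE]
    rw [he, hcb]; simp

lemma pvStepA_S (a b c : Option Int) (n : Int) (x : String)
    (ha : ∀ i, a = some i → i < n) (hb : ∀ i, b = some i → i < n) (hc : ∀ i, c = some i → i < n) :
    pvStepA (PySem.Dict.mk (pvS a b c)) (n, x) =
      PySem.Dict.mk (pvS (pvUpd a (pvMatches ["credit", "deposit", "receipts"] x) n)
                         (pvUpd b (pvMatches ["debit", "withdrawal", "payments"] x) n)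
                         (pvUpd c (pvMatches ["balance", "bal"] x) n)) := by
  rw [pvStepA_eq_append a b c n x]
  rw [pvS_updC _ _ _ _ _ (pvUpd_le ha) (pvUpd_le hb),
      pvS_updB _ _ _ _ _ (pvUpd_le ha) hc,
      pvS_updA _ _ _ _ _ hb hc]

lemma pvComb_cons (kws : List String) (o : Option Int) (n : Int) (x : String) (t : List String) :
    pvComb (pvUpd o (pvMatches kws x) n) (pvFirstIdx kws (PySem.List.enumerate t (n + 1))) =
    pvComb o (pvFirstIdx kws (PySem.List.enumerate (x :: t) n)) := by
  rcases o with _ | i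
  · cases hm : pvMatches kws x <;>
      simp [pvComb, pvUpd, hm, PySem.List.enumerate_cons, pvFirstIdx]
  · rfl

lemma pvLoop_S (l : List String) (n : Int) (a b c : Option Int)
    (ha : ∀ i, a = some i → i < n) (hb : ∀ i, b = some i → i < n) (hc : ∀ i, c = some i → i < n) :
    (PySem.List.enumerate l n).foldl pvStepA (PySem.Dict.mk (pvS a b c)) =
      PySem.Dict.mk (pvS
        (pvComb a (pvFirstIdx ["credit", "deposit", "receipts"] (PySem.List.enumerate l n)))
        (pvComb b (pvFirstIdx ["debit", "withdrawal", "payments"] (PySem.List.enumerate l n)))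
        (pvComb c (pvFirstIdx ["balance", "bal"] (PySem.List.enumerate l n)))) := by
  induction l generalizing n a b c with
  | nil =>
    simp only [PySem.List.enumerate_nil, List.foldl_nil]
    rcases a with _ | i <;> rcases b with _ | j <;> rcases c with _ | k <;> rfl
  | cons x t ih =>
    rw [PySem.List.enumerate_cons, List.foldl_cons, pvStepA_S a b c n x ha hb hc,
        ih (n + 1) _ _ _ (pvUpd_lt ha) (pvUpd_lt hb) (pvUpd_lt hc)]
    simp only [pvComb_cons, PySem.List.enumerate_cons]

lemma pvInsertBy_perm (f : (String × Int) → (String × Int) → Bool) (x : String × Int)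
    (l : List (String × Int)) : (PySem.List.insertBy f x l).Perm (x :: l) := by
  induction l with
  | nil => simp [PySem.List.insertBy]
  | cons y t ih =>
    simp only [PySem.List.insertBy]
    by_cases h : f x y = true
    · rw [if_pos h]
    · rw [if_neg h]
      exact (ih.cons y).trans (List.Perm.swap x y t)

lemma pvOptIns_perm_congr (k : String) (o : Option Int) {l l' : List (String × Int)}
    (h : l.Perm l') :
    (pvOptIns k o l).Perm ((match o with | none => [] | some v => [(k, v)]) ++ l') := by
  rcases o with _ | v
  · simpa using h
  · exact (pvInsertBy_perm _ _ _).trans (h.cons _)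

lemma pvS_perm (a b c : Option Int) :
    (pvS a b c).Perm ((match c with | none => [] | some v => [("balance", v)]) ++
      ((match b with | none => [] | some v => [("debit", v)]) ++
        ((match a with | none => [] | some v => [("credit", v)]) ++ []))) := by
  have p1 : (pvOptIns "credit" a []).Perm
      ((match a with | none => [] | some v => [("credit", v)]) ++ []) :=
    pvOptIns_perm_congr "credit" a (List.Perm.refl [])
  have p2 := pvOptIns_perm_congr "debit" b p1
  exact pvOptIns_perm_congr "balance" c p2

lemma pvKeys_S_nodup (a b c : Option Int) : ((pvS a b c).map Prod.fst).Nodup := by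
  have h := (pvS_perm a b c).map Prod.fst
  refine h.nodup_iff.mpr ?_
  rcases a with _ | i <;> rcases b with _ | j <;> rcases c with _ | k <;> simp

lemma pvOfList_items {l : List (String × Int)} (h : (l.map Prod.fst).Nodup) :
    (PySem.Dict.ofList l).items = l := by
  have := PySem.Dict.items_foldl_insert_fresh l Prod.fst Prod.snd
    (PySem.Dict.empty (κ := String) (ν := Int))
    (by intro p _; simp [PySem.Dict.contains, PySem.Dict.empty]) h
  simpa [PySem.Dict.ofList, PySem.Dict.update, PySem.Dict.empty] using this

lemma pvSorted_pvFound (a b c : Option Int) :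
    PySem.List.sorted (pvFound a b c) (fun e => e.2) = pvS a b c := by
  rw [PySem.List.sorted_eq_foldl_insertBy]
  rcases a with _ | i <;> rcases b with _ | j <;> rcases c with _ | k <;> rfl

lemma pvB_eq_S (header_row : List String) :
    detect_bank_header_py_alt header_row =
      pvS (pvFirstIdx ["credit", "deposit", "receipts"] (PySem.List.enumerate header_row 0))
          (pvFirstIdx ["debit", "withdrawal", "payments"] (PySem.List.enumerate header_row 0))
          (pvFirstIdx ["balance", "bal"] (PySem.List.enumerate header_row 0)) := by
  have h : detect_bank_header_py_alt header_row =
      (PySem.Dict.ofList (PySem.List.sorted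
        (pvFound (pvFirstIdx ["credit", "deposit", "receipts"] (PySem.List.enumerate header_row 0))
                 (pvFirstIdx ["debit", "withdrawal", "payments"] (PySem.List.enumerate header_row 0))
                 (pvFirstIdx ["balance", "bal"] (PySem.List.enumerate header_row 0)))
        (fun e => e.2))).items := rfl
  rw [h, pvSorted_pvFound, pvOfList_items (pvKeys_S_nodup _ _ _)]

-- ===== VERDICT (by name: the statement is the Claim_ definition above) =====
theorem detect_bank_header_py_spec : Claim_equal_detect_bank_header_py := by
  intro header_row _
  unfold Spec_detect_bank_header_py
  rw [pvB_eq_S]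
  unfold detect_bank_header_py
  have h0 : (PySem.Dict.empty (κ := String) (ν := Int)) = PySem.Dict.mk (pvS none none none) := rfl
  rw [h0, pvLoop_S header_row 0 none none none
    (by intro i h; simp at h) (by intro i h; simp at h) (by intro i h; simp at h)]
  rfl
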